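-- pv_equiv track=rewrite | github.com/kouddy3004/learnPython | BasicPython/basicProgramming/sdeSet/backTrackSet.py | checkIPvalid
-- ===== SOURCE A (Python) =====
-- def checkIPvalid(string):
--     check=False
--     if(len(string)<=15):
--         ip=string.split(".")
--         if len(ip) in range(3,5):
--             for i in ip:
--                 if len(i) in range(1,4):
--                     check=True
--                 else:
--                     check=False
--                     break
--     return check
-- ===== SOURCE B (Python) =====
-- def checkIPvalid(string):
--     # single left-to-right scan: track current segment length and dot count
--     if len(string) > 15:
--         return False
--     run = 0
--     dots = 0
--     for ch in string:
--         if ch == '.':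
--             if run == 0:
--                 return False
--             dots += 1
--             run = 0
--         else:
--             run += 1
--             if run > 3:
--                 return False
--     return run >= 1 and (dots == 2 or dots == 3)
-- ===== Notes on version B (the rewrite author's own statement) =====
-- stated objective: alternative
-- what changed: Replaced A's dot-split, segment-count check and per-segment length loop by a single left-to-right character scan that maintains the current run length and a dot counter, exiting early on an empty or over-long segment.
import Mathlib
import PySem

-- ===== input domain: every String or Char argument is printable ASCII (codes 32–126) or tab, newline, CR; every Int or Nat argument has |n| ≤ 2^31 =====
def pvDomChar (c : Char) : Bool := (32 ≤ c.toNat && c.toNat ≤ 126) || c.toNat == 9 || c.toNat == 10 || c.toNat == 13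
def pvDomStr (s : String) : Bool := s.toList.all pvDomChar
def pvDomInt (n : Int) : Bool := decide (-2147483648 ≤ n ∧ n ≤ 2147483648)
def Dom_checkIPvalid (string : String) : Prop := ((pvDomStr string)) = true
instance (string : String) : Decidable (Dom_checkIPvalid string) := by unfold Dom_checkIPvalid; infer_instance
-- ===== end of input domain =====

-- B replaces A's dot-split + segment-count check + per-segment length loop by a single
-- left-to-right character scan tracking the current run length and the dot count (alternative
-- decomposition, same asymptotic cost).

-- ===== PORT A =====
-- the 'for i in ip: … break' loop, carrying the 'check' flag
def checkIPvalidLoop : List String → Bool → Bool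
  | [], check => check
  | i :: rest, _check =>
      if 1 ≤ PySem.Str.len i ∧ PySem.Str.len i < 4 then checkIPvalidLoop rest true
      else false

def checkIPvalid (string : String) : Bool :=
  let check := false
  if PySem.Str.len string ≤ 15 then
    let ip := (PySem.Str.split? string ".").getD []   -- sep "." is nonempty, so split? is never none
    if 3 ≤ ip.length ∧ ip.length < 5 then checkIPvalidLoop ip check
    else check
  else check

-- ===== PORT B =====
-- the 'for ch in string' scan of Source B, with its two early returns
def checkIPvalidScan : List Char → Nat → Nat → Bool
  | [], run, dots => decide (1 ≤ run) && (dots == 2 || dots == 3)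
  | c :: rest, run, dots =>
      if c = '.' then
        if run = 0 then false else checkIPvalidScan rest 0 (dots + 1)
      else
        if run + 1 > 3 then false else checkIPvalidScan rest (run + 1) dots

def checkIPvalid_alt (string : String) : Bool :=
  if PySem.Str.len string > 15 then false
  else checkIPvalidScan string.toList 0 0

-- ===== PRECONDITION & SPEC =====
def Spec_checkIPvalid (string : String) (out : Bool) : Prop := out = checkIPvalid_alt string
instance (string : String) (out : Bool) : Decidable (Spec_checkIPvalid string out) := by unfold Spec_checkIPvalid; infer_instance

-- ===== CLAIM (what is proved, stated in full; the proofs are below) =====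
def Claim_equal_checkIPvalid : Prop := ∀ (string : String), Dom_checkIPvalid string → Spec_checkIPvalid string (checkIPvalid string)

-- ===== LEMMAS AND PROOFS =====

-- reference splitter: what Python's s.split(".") yields, as a structural recursion
def segs : List Char → List (List Char)
  | [] => [[]]
  | c :: rest => if c = '.' then [] :: segs rest else (segs rest).modifyHead (c :: ·)

theorem segs_ne_nil (l : List Char) : segs l ≠ [] := by
  induction l with
  | nil => simp [segs]
  | cons c rest ih =>
    simp only [segs]
    split
    · simp
    · cases h : segs rest with
      | nil => exact absurd h ih
      | cons a b => simp

theorem go_eq (l : List Char) : ∀ (fuel : Nat) (cur : List Char) (acc : List (List Char)),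
    l.length < fuel →
    PySem.Chars.splitOn.go ['.'] fuel l cur acc
      = acc.reverse ++ (segs l).modifyHead (cur.reverse ++ ·) := by
  induction l with
  | nil =>
    intro fuel cur acc h
    match fuel with
    | f+1 => simp [PySem.Chars.splitOn.go, segs]
  | cons c rest ih =>
    intro fuel cur acc h
    match fuel with
    | f+1 =>
      rw [PySem.Chars.splitOn.go]
      simp only [List.isPrefixOf, Bool.and_true, List.length_cons] at *
      by_cases hc : c = '.'
      · subst hc
        simp only [beq_self_eq_true, if_pos, List.length_nil, Nat.zero_add,
          List.drop_succ_cons, List.drop_zero]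
        rw [ih f [] (cur.reverse :: acc) (by omega)]
        cases h2 : segs rest with
        | nil => exact absurd h2 (segs_ne_nil rest)
        | cons a b => simp [segs, h2]
      · rw [if_neg (by simp [Ne.symm hc])]
        rw [ih f (c :: cur) acc (by omega)]
        cases h2 : segs rest with
        | nil => exact absurd h2 (segs_ne_nil rest)
        | cons a b => simp [segs, hc, h2]

theorem split?_dot (s : String) :
    PySem.Str.split? s "." = some ((segs s.toList).map String.ofList) := by
  show Option.map _ (PySem.Chars.split? s.toList ".".toList) = _
  have : PySem.Chars.splitOn s.toList ['.'] = segs s.toList := by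
    show PySem.Chars.splitOn.go ['.'] (s.toList.length + 1) s.toList [] [] = _
    rw [go_eq s.toList (s.toList.length + 1) [] [] (by omega)]
    cases h : segs s.toList with
    | nil => exact absurd h (segs_ne_nil s.toList)
    | cons a b => simp
  simp [PySem.Chars.split?, this]

def segOk (s : List Char) : Bool := decide (1 ≤ s.length ∧ s.length ≤ 3)

theorem loop_true (ls : List (List Char)) :
    checkIPvalidLoop (ls.map String.ofList) true = ls.all segOk := by
  induction ls with
  | nil => simp [checkIPvalidLoop]
  | cons s rest ih =>
    simp only [List.map_cons, checkIPvalidLoop, List.all_cons]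
    by_cases h : segOk s = true
    · rw [if_pos, ih, h, Bool.true_and]
      simp only [segOk, decide_eq_true_eq] at h
      simp [PySem.Str.len]; omega
    · rw [if_neg]
      · simp [h]
      · simp only [segOk, decide_eq_true_eq] at h
        simp [PySem.Str.len]; omega

theorem loop_false (s : List Char) (ls : List (List Char)) :
    checkIPvalidLoop ((s :: ls).map String.ofList) false
      = (segOk s && ls.all segOk) := by
  simp only [List.map_cons, checkIPvalidLoop]
  by_cases h : segOk s = true
  · rw [if_pos, loop_true, h, Bool.true_and]
    simp only [segOk, decide_eq_true_eq] at h
    simp [PySem.Str.len]; omega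
  · rw [if_neg]
    · simp [h]
    · simp only [segOk, decide_eq_true_eq] at h
      simp [PySem.Str.len]; omega

theorem scan_eq (cs : List Char) : ∀ (run dots : Nat), run ≤ 3 →
    checkIPvalidScan cs run dots
      = match segs cs with
        | [] => false
        | s0 :: ss =>
            decide (1 ≤ run + s0.length ∧ run + s0.length ≤ 3) && ss.all segOk
              && decide (dots + ss.length = 2 ∨ dots + ss.length = 3) := by
  induction cs with
  | nil =>
    intro run dots hrun
    simp only [segs, checkIPvalidScan, List.length_nil, List.all_nil, Nat.add_zero, Bool.and_true]
    by_cases hr1 : 1 ≤ run <;> by_cases d2 : dots = 2 <;> by_cases d3 : dots = 3 <;>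
      simp [hr1, d2, d3, hrun]
  | cons c rest ih =>
    intro run dots hrun
    by_cases hc : c = '.'
    · subst hc
      have hs : segs ('.' :: rest) = [] :: segs rest := by simp [segs]
      rw [hs]
      simp only [checkIPvalidScan, if_true]
      by_cases hr : run = 0
      · subst hr
        rw [if_pos rfl]
        simp
      · rw [if_neg hr, ih 0 (dots + 1) (by omega)]
        cases h2 : segs rest with
        | nil => exact absurd h2 (segs_ne_nil rest)
        | cons a b =>
          have e1 : (1 ≤ run + List.length ([] : List Char) ∧
              run + List.length ([] : List Char) ≤ 3) ↔ True := by
            simp only [List.length_nil]; constructor <;> intro <;> [trivial; omega]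
          have e2 : (dots + 1 + b.length = 2 ∨ dots + 1 + b.length = 3) ↔
              (dots + (a :: b).length = 2 ∨ dots + (a :: b).length = 3) := by
            simp only [List.length_cons]; omega
          have e3 : segOk a = decide (1 ≤ 0 + a.length ∧ 0 + a.length ≤ 3) := by
            simp [segOk]
          simp only [List.all_cons, e2, e3, e1]
          simp
    · have hs : segs (c :: rest) = (segs rest).modifyHead (c :: ·) := by simp [segs, hc]
      rw [hs]
      simp only [checkIPvalidScan]
      rw [if_neg hc]
      cases h2 : segs rest with
      | nil => exact absurd h2 (segs_ne_nil rest)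
      | cons a b =>
        by_cases hbig : run + 1 > 3
        · rw [if_pos hbig]
          have e4 : (1 ≤ run + (a.length + 1) ∧ run + (a.length + 1) ≤ 3) ↔ False :=
            iff_false_intro (by omega)
          simp only [List.modifyHead_cons, List.length_cons, e4, decide_false,
            Bool.false_and]
        · rw [if_neg hbig, ih (run + 1) dots (by omega)]
          have e5 : (1 ≤ run + 1 + a.length ∧ run + 1 + a.length ≤ 3) ↔
              (1 ≤ run + ((c :: a).length) ∧ run + ((c :: a).length) ≤ 3) := by
            simp only [List.length_cons]; omega
          simp only [h2, List.modifyHead_cons, e5]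

-- ===== VERDICT (by name: the statement is the Claim_ definition above) =====
theorem checkIPvalid_spec : Claim_equal_checkIPvalid := by
  intro string _hdom
  unfold Spec_checkIPvalid checkIPvalid checkIPvalid_alt
  by_cases hlen : PySem.Str.len string ≤ 15
  · rw [if_pos hlen, if_neg (show ¬ PySem.Str.len string > 15 by omega)]
    rw [split?_dot]
    simp only [Option.getD_some]
    rw [scan_eq string.toList 0 0 (by omega)]
    cases h2 : segs string.toList with
    | nil => exact absurd h2 (segs_ne_nil string.toList)
    | cons s0 ss =>
      simp only [List.length_map, List.length_cons]
      by_cases hk : 3 ≤ ss.length + 1 ∧ ss.length + 1 < 5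
      · rw [if_pos hk, loop_false]
        have h1 : segOk s0 = decide (1 ≤ 0 + s0.length ∧ 0 + s0.length ≤ 3) := by
          simp [segOk]
        have h3 : (0 + ss.length = 2 ∨ 0 + ss.length = 3) ↔ True :=
          iff_true_intro (by omega)
        simp only [h1, h3, decide_true, Bool.and_true]
      · rw [if_neg hk]
        have h3 : (0 + ss.length = 2 ∨ 0 + ss.length = 3) ↔ False :=
          iff_false_intro (by omega)
        simp only [h3, decide_false, Bool.and_false]
  · rw [if_neg hlen, if_pos (show PySem.Str.len string > 15 by omega)]
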